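-- pv_equiv track=rewrite | github.com/yuanw/qmk-keymap | scripts/generate_mouseless_grid.py | create_grid_string
-- ===== SOURCE A (Python) =====
-- def qmk_to_mouseless_key(keycode: str) -> str:
--     """
--     Convert QMK keycode to mouseless physical key character.
--
--     Args:
--         keycode: QMK keycode (e.g., "KC_Q", "HRM_C", "LR_DOT")
--
--     Returns:
--         Single character for mouseless grid (e.g., "Q", "C", ".")
--     """
--     # Strip common prefixes
--     if keycode.startswith('HRM_'):
--         return keycode[4:]  # HRM_C → C
--     if keycode.startswith('LR_'):
--         keycode = keycode[3:]  # LR_DOT → DOT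
--     if keycode.startswith('KC_'):
--         keycode = keycode[3:]  # KC_Q → Q
--
--     # Map special QMK keycodes to physical characters
--     key_map = {
--         'COMM': ',',
--         'QUOT': "'",
--         'SCLN': ';',
--         'SLASH': '/',
--         'MINS': '-',
--         'EQL': '=',
--         'DOT': '.',
--     }
--
--     return key_map.get(keycode, keycode)
--
-- def create_grid_string(layer_keys: list[str]) -> str:
--     """
--     Create mouseless grid string from BASE layer keys.
--
--     The Charybdis 3x5 layout has 35 keys total stored in QMK as:
--     - Keys 0-14: Left hand (row-major: 3 rows × 5 cols)
--     - Keys 15-29: Right hand (row-major: 3 rows × 5 cols)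
--     - Keys 30-34: Thumb cluster (not used in mouseless grid)
--
--     QMK stores keys as:
--       L Row 0: [0, 1, 2, 3, 4]     R Row 0: [15, 16, 17, 18, 19]
--       L Row 1: [5, 6, 7, 8, 9]     R Row 1: [20, 21, 22, 23, 24]
--       L Row 2: [10, 11, 12, 13, 14] R Row 2: [25, 26, 27, 28, 29]
--
--     For mouseless 10×3 grid, we want left and right hands side-by-side,
--     reading each row from left pinky to right pinky.
--
--     Args:
--         layer_keys: List of all keycodes from BASE layer
--
--     Returns:
--         Grid string with 6 groups of 5 chars: "GROUP1 GROUP2 GROUP3 GROUP4 GROUP5 GROUP6"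
--         Each pair of groups forms one row (10 keys)
--     """
--     # Extract main matrix keys (exclude thumb cluster)
--     main_keys = layer_keys[:30]
--
--     # QMK layout in row-major order (left hand then right hand)
--     # Build the mouseless grid row by row
--     groups = []
--
--     for row_idx in range(3):
--         # Left hand: reverse the keys for this row (right-to-left reading)
--         left_start = row_idx * 5
--         left_keys = main_keys[left_start:left_start + 5]
--         left_keys_reversed = left_keys[::-1]
--         left_group = ''.join(qmk_to_mouseless_key(k) for k in left_keys_reversed)
--
--         # Right hand: normal order (left-to-right reading)
--         right_start = 15 + row_idx * 5
--         right_keys = main_keys[right_start:right_start + 5]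
--         right_group = ''.join(qmk_to_mouseless_key(k) for k in right_keys)
--
--         groups.append(left_group)
--         groups.append(right_group)
--
--     return ' '.join(groups)
-- ===== SOURCE B (Python) =====
-- _KEY_MAP = {
--     'COMM': ',',
--     'QUOT': "'",
--     'SCLN': ';',
--     'SLASH': '/',
--     'MINS': '-',
--     'EQL': '=',
--     'DOT': '.',
-- }
--
--
-- def _key(keycode):
--     if keycode.startswith('HRM_'):
--         return keycode[4:]
--     if keycode.startswith('LR_'):
--         keycode = keycode[3:]
--     if keycode.startswith('KC_'):
--         keycode = keycode[3:]
--     return _KEY_MAP.get(keycode, keycode)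
--
--
-- def create_grid_string(layer_keys):
--     # Single pass over the matrix keys in storage order: each key is dispatched
--     # to its output group by index arithmetic; left-hand keys are PREPENDED to
--     # their group (which realises the right-to-left reading without any
--     # slicing or reversal), right-hand keys are appended.
--     groups = ['', '', '', '', '', '']
--     for i, kc in enumerate(layer_keys[:30]):
--         ch = _key(kc)
--         if i < 15:
--             g = 2 * (i // 5)
--             groups[g] = ch + groups[g]
--         else:
--             g = 2 * (i // 5) - 5
--             groups[g] = groups[g] + ch
--     return ' '.join(groups)
-- ===== Notes on version B (the rewrite author's own statement) =====
-- stated objective: alternative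
-- what changed: B makes a single pass over the matrix keys in storage order, dispatching each converted key to one of six group accumulators by index arithmetic on i//5, prepending left-hand keys (which realises the right-to-left reading without slicing or reversing), instead of A's per-row slice/reverse/join construction.
import Mathlib
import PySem

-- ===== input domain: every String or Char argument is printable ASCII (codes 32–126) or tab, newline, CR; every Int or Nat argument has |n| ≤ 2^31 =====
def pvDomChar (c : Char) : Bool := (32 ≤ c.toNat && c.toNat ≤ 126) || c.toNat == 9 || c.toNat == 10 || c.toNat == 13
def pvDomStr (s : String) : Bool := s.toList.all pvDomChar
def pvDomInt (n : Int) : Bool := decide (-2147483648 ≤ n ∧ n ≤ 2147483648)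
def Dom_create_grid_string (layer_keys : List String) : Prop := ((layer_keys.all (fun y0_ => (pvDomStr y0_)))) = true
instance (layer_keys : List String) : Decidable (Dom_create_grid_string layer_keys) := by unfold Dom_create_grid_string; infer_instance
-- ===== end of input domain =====

-- B replaces A's row-by-row slice/reverse/join construction by a single pass over the
-- matrix keys in storage order that dispatches each key to its group by index arithmetic,
-- prepending left-hand keys; objective: alternative decomposition (return value only).


-- ===== PORT A =====
def pvKeyMapA : PySem.Dict String String :=
  PySem.Dict.ofList [("COMM", ","), ("QUOT", "'"), ("SCLN", ";"), ("SLASH", "/"),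
                     ("MINS", "-"), ("EQL", "="), ("DOT", ".")]

def qmk_to_mouseless_key (keycode : String) : String :=
  if PySem.Str.startswith keycode "HRM_" then PySem.Str.slice keycode (some 4) none
  else
    let k1 := if PySem.Str.startswith keycode "LR_" then PySem.Str.slice keycode (some 3) none else keycode
    let k2 := if PySem.Str.startswith k1 "KC_" then PySem.Str.slice k1 (some 3) none else k1
    (pvKeyMapA.get? k2).getD k2

def create_grid_string (layer_keys : List String) : String :=
  let main_keys := PySem.List.slice layer_keys none (some 30)
  let groups := (PySem.List.pyRange 0 3 1).foldl (fun gs row_idx =>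
    let left_start := row_idx * 5
    let left_keys := PySem.List.slice main_keys (some left_start) (some (left_start + 5))
    let left_keys_reversed := (PySem.List.slice? left_keys none none (-1)).getD []
    let left_group := PySem.Str.join "" (left_keys_reversed.map qmk_to_mouseless_key)
    let right_start := 15 + row_idx * 5
    let right_keys := PySem.List.slice main_keys (some right_start) (some (right_start + 5))
    let right_group := PySem.Str.join "" (right_keys.map qmk_to_mouseless_key)
    gs ++ [left_group, right_group]) ([] : List String)
  PySem.Str.join " " groups

-- ===== PORT B =====
def pvKeyMapB : PySem.Dict String String :=
  PySem.Dict.ofList [("COMM", ","), ("QUOT", "'"), ("SCLN", ";"), ("SLASH", "/"),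
                     ("MINS", "-"), ("EQL", "="), ("DOT", ".")]

def pvAltKey (keycode : String) : String :=
  if PySem.Str.startswith keycode "HRM_" then PySem.Str.slice keycode (some 4) none
  else
    let k1 := if PySem.Str.startswith keycode "LR_" then PySem.Str.slice keycode (some 3) none else keycode
    let k2 := if PySem.Str.startswith k1 "KC_" then PySem.Str.slice k1 (some 3) none else k1
    (pvKeyMapB.get? k2).getD k2

-- one loop-body step of B: dispatch key (index i) to its group; left hand prepends
def pvStep (gs : List String) (p : Int × String) : List String :=
  let ch := pvAltKey p.2
  if p.1 < 15 then
    let g := 2 * PySem.Int.floordiv p.1 5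
    PySem.List.pySetD gs g (ch ++ PySem.List.pyGetD gs g "")
  else
    let g := 2 * PySem.Int.floordiv p.1 5 - 5
    PySem.List.pySetD gs g (PySem.List.pyGetD gs g "" ++ ch)

def create_grid_string_alt (layer_keys : List String) : String :=
  let groups := (PySem.List.enumerate (PySem.List.slice layer_keys none (some 30)) 0).foldl
    pvStep ["", "", "", "", "", ""]
  PySem.Str.join " " groups

-- ===== PRECONDITION & SPEC =====
def Spec_create_grid_string (layer_keys : List String) (out : String) : Prop := out = create_grid_string_alt layer_keys
instance (layer_keys : List String) (out : String) : Decidable (Spec_create_grid_string layer_keys out) := by unfold Spec_create_grid_string; infer_instance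

-- ===== CLAIM (what is proved, stated in full; the proofs are below) =====
def Claim_equal_create_grid_string : Prop := ∀ (layer_keys : List String), Dom_create_grid_string layer_keys → Spec_create_grid_string layer_keys (create_grid_string layer_keys)

-- ===== LEMMAS AND PROOFS =====

theorem pvAltKey_eq : pvAltKey = qmk_to_mouseless_key := by rfl

-- the six group strings of the final grid, as functions of the 30 matrix keys
def pvRowL (main : List String) (d : Nat) : String :=
  PySem.Str.join "" ((((main.drop d).take 5).reverse).map pvAltKey)

def pvRowR (main : List String) (d : Nat) : String :=
  PySem.Str.join "" (((main.drop d).take 5).map pvAltKey)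

def pvFinal (main : List String) : List String :=
  [pvRowL main 0, pvRowR main 15, pvRowL main 5, pvRowR main 20, pvRowL main 10, pvRowR main 25]

theorem join_empty_cons (s : String) (l : List String) :
    PySem.Str.join "" (s :: l) = s ++ PySem.Str.join "" l := by
  apply String.toList_injective
  cases l <;> simp [PySem.Str.join, PySem.Chars.join, List.intercalate]

theorem join_empty_nil : PySem.Str.join "" ([] : List String) = "" := by
  apply String.toList_injective
  simp [PySem.Str.join, PySem.Chars.join, List.intercalate]

theorem join_empty_snoc (l : List String) (s : String) :
    PySem.Str.join "" (l ++ [s]) = PySem.Str.join "" l ++ s := by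
  induction l with
  | nil => simp [join_empty_cons, join_empty_nil]
  | cons a t ih => simp [join_empty_cons, ih, String.append_assoc]

theorem chunk_keep (ys : List String) (x : String) (d : Nat)
    (h : ys.length < d ∨ d + 5 ≤ ys.length) :
    (((ys ++ [x]).drop d).take 5) = ((ys.drop d).take 5) := by
  rcases h with h | h
  · rw [List.drop_eq_nil_of_le (by simp; omega), List.drop_eq_nil_of_le (by omega)]
  · rw [List.drop_append_of_le_length (by omega),
        List.take_append_of_le_length (by simp; omega)]

theorem chunk_mid (ys : List String) (x : String) (d : Nat)
    (h1 : d ≤ ys.length) (h2 : ys.length < d + 5) :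
    (((ys ++ [x]).drop d).take 5) = ((ys.drop d).take 5) ++ [x] := by
  rw [List.drop_append_of_le_length h1,
      List.take_of_length_le (by simp; omega),
      List.take_of_length_le (by simp; omega)]

theorem rowL_mid (ys : List String) (x : String) (d : Nat)
    (h1 : d ≤ ys.length) (h2 : ys.length < d + 5) :
    pvRowL (ys ++ [x]) d = pvAltKey x ++ pvRowL ys d := by
  unfold pvRowL
  rw [chunk_mid ys x d h1 h2]
  simp [join_empty_cons]

theorem rowL_keep (ys : List String) (x : String) (d : Nat)
    (h : ys.length < d ∨ d + 5 ≤ ys.length) :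
    pvRowL (ys ++ [x]) d = pvRowL ys d := by
  unfold pvRowL; rw [chunk_keep ys x d h]

theorem rowR_mid (ys : List String) (x : String) (d : Nat)
    (h1 : d ≤ ys.length) (h2 : ys.length < d + 5) :
    pvRowR (ys ++ [x]) d = pvRowR ys d ++ pvAltKey x := by
  unfold pvRowR
  rw [chunk_mid ys x d h1 h2]
  simp [join_empty_snoc]

theorem rowR_keep (ys : List String) (x : String) (d : Nat)
    (h : ys.length < d ∨ d + 5 ≤ ys.length) :
    pvRowR (ys ++ [x]) d = pvRowR ys d := by
  unfold pvRowR; rw [chunk_keep ys x d h]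

theorem pvStep_spec (ys : List String) (x : String) (h : ys.length ≤ 29) :
    pvStep (pvFinal ys) ((ys.length : Int), x) = pvFinal (ys ++ [x]) := by
  have hfd : PySem.Int.floordiv (ys.length : Int) 5 = ((ys.length / 5 : Nat) : Int) := by
    exact_mod_cast PySem.Int.floordiv_natCast ys.length 5
  simp only [pvStep, hfd]
  by_cases h15 : (ys.length : Int) < 15
  · rw [if_pos h15]
    rw [PySem.List.pySetD_of_nonneg _ _ (by omega), PySem.List.pyGetD_of_nonneg _ _ (by omega)]
    rcases (by omega : ys.length < 5 ∨ (5 ≤ ys.length ∧ ys.length < 10) ∨ (10 ≤ ys.length ∧ ys.length < 15)) with h5 | h5 | h5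
    · have hq : ys.length / 5 = 0 := by omega
      simp only [hq, pvFinal,
        rowL_mid ys x 0 (by omega) (by omega),
        rowR_keep ys x 15 (by omega),
        rowL_keep ys x 5 (by omega),
        rowR_keep ys x 20 (by omega),
        rowL_keep ys x 10 (by omega),
        rowR_keep ys x 25 (by omega)]
      norm_num [show Int.toNat 2 = 2 from rfl, show Int.toNat 3 = 3 from rfl,
        show Int.toNat 4 = 4 from rfl, show Int.toNat 5 = 5 from rfl]
    · have hq : ys.length / 5 = 1 := by omega
      simp only [hq, pvFinal,
        rowL_keep ys x 0 (by omega),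
        rowR_keep ys x 15 (by omega),
        rowL_mid ys x 5 (by omega) (by omega),
        rowR_keep ys x 20 (by omega),
        rowL_keep ys x 10 (by omega),
        rowR_keep ys x 25 (by omega)]
      norm_num [show Int.toNat 2 = 2 from rfl, show Int.toNat 3 = 3 from rfl,
        show Int.toNat 4 = 4 from rfl, show Int.toNat 5 = 5 from rfl]
    · have hq : ys.length / 5 = 2 := by omega
      simp only [hq, pvFinal,
        rowL_keep ys x 0 (by omega),
        rowR_keep ys x 15 (by omega),
        rowL_keep ys x 5 (by omega),
        rowR_keep ys x 20 (by omega),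
        rowL_mid ys x 10 (by omega) (by omega),
        rowR_keep ys x 25 (by omega)]
      norm_num [show Int.toNat 2 = 2 from rfl, show Int.toNat 3 = 3 from rfl,
        show Int.toNat 4 = 4 from rfl, show Int.toNat 5 = 5 from rfl]
  · rw [if_neg h15]
    rw [PySem.List.pySetD_of_nonneg _ _ (by omega), PySem.List.pyGetD_of_nonneg _ _ (by omega)]
    rcases (by omega : (15 ≤ ys.length ∧ ys.length < 20) ∨ (20 ≤ ys.length ∧ ys.length < 25) ∨ (25 ≤ ys.length ∧ ys.length < 30)) with h5 | h5 | h5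
    · have hq : ys.length / 5 = 3 := by omega
      simp only [hq, pvFinal,
        rowL_keep ys x 0 (by omega),
        rowR_mid ys x 15 (by omega) (by omega),
        rowL_keep ys x 5 (by omega),
        rowR_keep ys x 20 (by omega),
        rowL_keep ys x 10 (by omega),
        rowR_keep ys x 25 (by omega)]
      norm_num [show Int.toNat 2 = 2 from rfl, show Int.toNat 3 = 3 from rfl,
        show Int.toNat 4 = 4 from rfl, show Int.toNat 5 = 5 from rfl]
    · have hq : ys.length / 5 = 4 := by omega
      simp only [hq, pvFinal,
        rowL_keep ys x 0 (by omega),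
        rowR_keep ys x 15 (by omega),
        rowL_keep ys x 5 (by omega),
        rowR_mid ys x 20 (by omega) (by omega),
        rowL_keep ys x 10 (by omega),
        rowR_keep ys x 25 (by omega)]
      norm_num [show Int.toNat 2 = 2 from rfl, show Int.toNat 3 = 3 from rfl,
        show Int.toNat 4 = 4 from rfl, show Int.toNat 5 = 5 from rfl]
    · have hq : ys.length / 5 = 5 := by omega
      simp only [hq, pvFinal,
        rowL_keep ys x 0 (by omega),
        rowR_keep ys x 15 (by omega),
        rowL_keep ys x 5 (by omega),
        rowR_keep ys x 20 (by omega),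
        rowL_keep ys x 10 (by omega),
        rowR_mid ys x 25 (by omega) (by omega)]
      norm_num [show Int.toNat 2 = 2 from rfl, show Int.toNat 3 = 3 from rfl,
        show Int.toNat 4 = 4 from rfl, show Int.toNat 5 = 5 from rfl]

theorem pv_master : ∀ (main : List String), main.length ≤ 30 →
    (PySem.List.enumerate main 0).foldl pvStep ["", "", "", "", "", ""] = pvFinal main := by
  intro main
  induction main using List.reverseRecOn with
  | nil => intro _; decide
  | append_singleton ys x ih =>
    intro h
    rw [PySem.List.enumerate_append, List.foldl_append,
        ih (by simp at h; omega)]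
    simp only [PySem.List.enumerate_cons, PySem.List.enumerate_nil, List.foldl_cons,
      List.foldl_nil, zero_add]
    exact pvStep_spec ys x (by simp at h; omega)

-- ===== VERDICT (by name: the statement is the Claim_ definition above) =====
theorem create_grid_string_spec : Claim_equal_create_grid_string := by
  intro l _
  unfold Spec_create_grid_string
  have hmain : PySem.List.slice l none (some 30) = l.take 30 := by
    rw [PySem.List.slice_to _ (by norm_num)]; norm_num [show Int.toNat 30 = 30 from rfl, show Int.toNat 5 = 5 from rfl]
  simp only [create_grid_string, create_grid_string_alt, hmain,
    (by decide : PySem.List.pyRange 0 3 1 = [0, 1, 2]), List.foldl_cons, List.foldl_nil]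
  rw [pv_master (l.take 30) (by simp)]
  norm_num
  rw [PySem.List.slice?_none_none_neg_one, PySem.List.slice?_none_none_neg_one,
      PySem.List.slice?_none_none_neg_one]
  simp only [Option.getD_some]
  rw [(by rw [PySem.List.slice_to _ (by norm_num)]; norm_num [show Int.toNat 30 = 30 from rfl, show Int.toNat 5 = 5 from rfl] :
        PySem.List.slice (l.take 30) none (some 5) = (l.take 30).take 5)]
  rw [PySem.List.slice_toNat _ (by norm_num) (by norm_num),
      PySem.List.slice_toNat _ (by norm_num) (by norm_num),
      PySem.List.slice_toNat _ (by norm_num) (by norm_num),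
      PySem.List.slice_toNat _ (by norm_num) (by norm_num),
      PySem.List.slice_toNat _ (by norm_num) (by norm_num)]
  simp [pvFinal, pvRowL, pvRowR, pvAltKey_eq]
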